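-- pv_equiv track=rewrite | github.com/ludon89/the-warehouse | thewarehouse_test.py | check_triplicate_letters
-- ===== SOURCE A (Python) =====
-- def check_triplicate_letters(id):
--     letter_counter = {}
--
--     for letter in id:
--         if letter in letter_counter:
--             letter_counter[letter] += 1
--         else:
--             letter_counter[letter] = 1
--
--     for letter, count in letter_counter.items():
--         if count == 3:
--             return True
--
--     return False
-- ===== SOURCE B (Python) =====
-- def check_triplicate_letters(id):
--     prev = None
--     run = 0
--     for c in sorted(id):
--         if c == prev:
--             run += 1
--         else:
--             if run == 3:
--                 return True
--             prev, run = c, 1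
--     return run == 3
-- ===== Notes on version B (the rewrite author's own statement) =====
-- stated objective: alternative
-- what changed: B sorts the characters once and scans the sorted sequence counting adjacent equal runs, returning True when a run of length exactly 3 ends, instead of maintaining a frequency dictionary and scanning its items.
import Mathlib
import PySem

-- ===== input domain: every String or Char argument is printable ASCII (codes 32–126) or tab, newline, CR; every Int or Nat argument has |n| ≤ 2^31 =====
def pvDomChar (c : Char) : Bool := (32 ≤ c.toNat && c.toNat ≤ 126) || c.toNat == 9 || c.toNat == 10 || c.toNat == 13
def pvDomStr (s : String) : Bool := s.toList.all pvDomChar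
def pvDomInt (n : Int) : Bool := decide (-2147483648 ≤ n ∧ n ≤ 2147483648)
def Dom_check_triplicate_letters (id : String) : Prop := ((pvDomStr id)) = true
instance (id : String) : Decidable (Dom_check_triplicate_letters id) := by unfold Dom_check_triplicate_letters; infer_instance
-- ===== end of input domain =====

-- B replaces A's frequency dictionary by one sort followed by a scan of adjacent equal runs (objective: alternative).

-- ===== PORT A =====
def check_triplicate_letters (id : String) : Bool :=
  let letter_counter := id.toList.foldl
    (fun d letter =>
      if d.contains letter then d.insert letter (d.getD letter 0 + 1)
      else d.insert letter (1 : Int))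
    PySem.Dict.empty
  letter_counter.items.any (fun p => p.2 == 3)

-- ===== PORT B =====
-- the for-loop over sorted(id) with state (prev, run) and the early return
def runLoop (prev : Option Char) (run : Int) : List Char → Bool
  | [] => run == 3
  | c :: rest =>
    if some c == prev then runLoop prev (run + 1) rest
    else if run == 3 then true
    else runLoop (some c) 1 rest

def check_triplicate_letters_alt (id : String) : Bool :=
  runLoop none 0 (PySem.List.sorted id.toList (fun c => c) false)

-- ===== PRECONDITION & SPEC =====
def Spec_check_triplicate_letters (id : String) (out : Bool) : Prop := out = check_triplicate_letters_alt id
instance (id : String) (out : Bool) : Decidable (Spec_check_triplicate_letters id out) := by unfold Spec_check_triplicate_letters; infer_instance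

-- ===== CLAIM (what is proved, stated in full; the proofs are below) =====
def Claim_equal_check_triplicate_letters : Prop := ∀ (id : String), Dom_check_triplicate_letters id → Spec_check_triplicate_letters id (check_triplicate_letters id)

-- ===== LEMMAS AND PROOFS =====

theorem A_iff (l : List Char) :
    ((l.foldl (fun d letter =>
        if d.contains letter then d.insert letter (d.getD letter 0 + 1)
        else d.insert letter (1 : Int)) PySem.Dict.empty).items.any (fun p => p.2 == 3)) = true
      ↔ ∃ c ∈ l, l.count c = 3 := by
  have hfun : (fun (d : PySem.Dict Char Int) letter =>
      if d.contains letter then d.insert letter (d.getD letter 0 + 1)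
      else d.insert letter (1 : Int))
      = (fun (d : PySem.Dict Char Int) x => d.insert x (d.getD x 0 + 1)) := by
    funext d c
    by_cases h : d.contains c = true
    · simp [h]
    · simp only [Bool.not_eq_true] at h
      rw [PySem.Dict.getD_of_not_contains (h := h)]; simp [h]
  rw [hfun, PySem.Dict.foldl_insert_getD_add_one_eq_counter, PySem.Dict.items_counter,
    List.any_map]
  simp only [List.any_eq_true, Function.comp]
  constructor
  · rintro ⟨c, hc, h3⟩
    refine ⟨c, (PySem.Set.mem_ofList _ _).1 hc, ?_⟩
    have := beq_iff_eq.1 h3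
    exact_mod_cast this
  · rintro ⟨c, hc, h3⟩
    refine ⟨c, (PySem.Set.mem_ofList _ _).2 hc, ?_⟩
    simp [h3]

theorem runLoop_replicate (m : Nat) (c : Char) (r : Int) (t : List Char) :
    runLoop (some c) r (List.replicate m c ++ t) = runLoop (some c) (r + m) t := by
  induction m generalizing r with
  | zero => simp
  | succ k ih =>
    simp only [List.replicate_succ, List.cons_append, runLoop, BEq.rfl, if_true]
    rw [ih]
    congr 1
    push_cast
    ring

theorem runLoop_switch (c : Char) (r : Int) (t : List Char)
    (h : t = [] ∨ ∃ d t', t = d :: t' ∧ d ≠ c) :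
    runLoop (some c) r t = if r == 3 then true else runLoop none 0 t := by
  rcases h with h | ⟨d, t', rfl, hd⟩
  · subst h; rw [Bool.eq_iff_iff]; simp [runLoop]
  · simp [runLoop, hd]

theorem dropWhile_beq_head (c d : Char) (t' : List Char) :
    ∀ (l : List Char), l.dropWhile (· == c) = d :: t' → (d = c → False) := by
  intro l
  induction l with
  | nil => intro h; simp [List.dropWhile] at h
  | cons a as ihh =>
    intro h hdc
    by_cases hac : a = c
    · rw [List.dropWhile_cons_of_pos (by simp [hac])] at h
      exact ihh h hdc
    · rw [List.dropWhile_cons_of_neg (by simp [hac])] at h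
      injection h with h1 _
      exact hac (h1.trans hdc)

theorem runLoop_spec_aux : ∀ (n : Nat) (s : List Char), s.length ≤ n → s.Pairwise (· ≤ ·) →
    (runLoop none 0 s = true ↔ ∃ c ∈ s, s.count c = 3) := by
  intro n
  induction n with
  | zero =>
    intro s hl _
    have : s = [] := List.eq_nil_of_length_eq_zero (Nat.le_zero.1 hl)
    subst this
    simp [runLoop]
  | succ n ih =>
    intro s hl hs
    match s with
    | [] => simp [runLoop]
    | c :: rest =>
      have hct : ∀ x ∈ rest, c ≤ x := (List.pairwise_cons.1 hs).1
      have hrest_pw : rest.Pairwise (· ≤ ·) := (List.pairwise_cons.1 hs).2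
      set m := (rest.takeWhile (· == c)).length with hm
      set t := rest.dropWhile (· == c) with htdef
      have htake : rest.takeWhile (· == c) = List.replicate m c := by
        apply List.eq_replicate_of_mem
        intro b hb
        have hbp := List.mem_takeWhile_imp hb
        exact eq_of_beq hbp
      have hsplit : rest = List.replicate m c ++ t := by
        rw [← htake, htdef, List.takeWhile_append_dropWhile]
      have ht_sub : t.Sublist rest := List.dropWhile_sublist _
      have ht_pw : t.Pairwise (· ≤ ·) := hrest_pw.sublist ht_sub
      have hshape : t = [] ∨ ∃ d t', t = d :: t' ∧ d ≠ c := by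
        cases ht : t with
        | nil => exact Or.inl rfl
        | cons d t' =>
          refine Or.inr ⟨d, t', rfl, ?_⟩
          intro hdc
          exact dropWhile_beq_head c d t' rest (htdef ▸ ht) hdc
      have hcnot : c ∉ t := by
        rcases hshape with h0 | ⟨d, t', ht, hd⟩
        · simp [h0]
        · intro hc
          have hdrest : d ∈ rest := ht_sub.mem (ht ▸ List.mem_cons_self ..)
          have hcd : c < d := lt_of_le_of_ne (hct d hdrest) (Ne.symm hd)
          rw [ht] at hc
          rcases List.mem_cons.1 hc with h | h
          · exact hd h.symm
          · have : d ≤ c := ((List.pairwise_cons.1 (ht ▸ ht_pw)).1) c h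
            exact absurd (lt_of_lt_of_le hcd this) (lt_irrefl c)
      have hcount_c : (c :: rest).count c = 1 + m := by
        rw [List.count_cons_self, hsplit, List.count_append]
        rw [List.count_replicate_self, List.count_eq_zero.2 hcnot]
        omega
      have hcount_ne : ∀ d, d ≠ c → (c :: rest).count d = t.count d := by
        intro d hd
        rw [hsplit]
        simp [List.count_append, List.count_replicate, (Ne.symm hd : ¬c = d)]
      have hmem : ∀ x, x ∈ c :: rest ↔ x = c ∨ x ∈ t := by
        intro x
        rw [List.mem_cons, hsplit, List.mem_append, List.mem_replicate]
        constructor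
        · rintro (h | ⟨_, h⟩ | h) <;> [exact Or.inl h; exact Or.inl h; exact Or.inr h]
        · rintro (h | h) <;> [exact Or.inl h; exact Or.inr (Or.inr h)]
      have hrun : runLoop none 0 (c :: rest)
          = if ((1 : Int) + m == 3) then true else runLoop none 0 t := by
        have h1 : runLoop none 0 (c :: rest) = runLoop (some c) 1 rest := by
          simp only [runLoop]
          norm_num
        rw [h1, hsplit, runLoop_replicate, runLoop_switch _ _ _ hshape]
      have hiht : runLoop none 0 t = true ↔ ∃ d ∈ t, t.count d = 3 := by
        apply ih t _ ht_pw
        have := ht_sub.length_le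
        simp at hl
        omega
      rw [hrun]
      by_cases h3 : (1 : Int) + m = 3
      · rw [if_pos (by exact beq_iff_eq.2 h3)]
        simp only [true_iff]
        refine ⟨c, List.mem_cons_self .., ?_⟩
        rw [hcount_c]
        omega
      · rw [if_neg (by simpa using h3), hiht]
        constructor
        · rintro ⟨d, hd, hcnt⟩
          have hdc : d ≠ c := by
            rintro rfl
            exact hcnot hd
          exact ⟨d, (hmem d).2 (Or.inr hd), by rw [hcount_ne d hdc]; exact hcnt⟩
        · rintro ⟨x, hx, hcnt⟩
          rcases (hmem x).1 hx with rfl | hxt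
          · rw [hcount_c] at hcnt
            exact absurd (by omega : (1 : Int) + m = 3) h3
          · have hxc : x ≠ c := fun h => hcnot (h ▸ hxt)
            exact ⟨x, hxt, by rw [← hcount_ne x hxc]; exact hcnt⟩

theorem runLoop_spec (s : List Char) (hs : s.Pairwise (· ≤ ·)) :
    runLoop none 0 s = true ↔ ∃ c ∈ s, s.count c = 3 :=
  runLoop_spec_aux s.length s le_rfl hs

-- ===== VERDICT (by name: the statement is the Claim_ definition above) =====
theorem check_triplicate_letters_spec : Claim_equal_check_triplicate_letters := by
  intro id _
  unfold Spec_check_triplicate_letters check_triplicate_letters check_triplicate_letters_alt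
  simp only []
  rw [Bool.eq_iff_iff, A_iff, runLoop_spec _ (by
    simpa using PySem.List.sorted_pairwise id.toList (fun c => c))]
  constructor
  · rintro ⟨c, hc, hcount⟩
    exact ⟨c, (PySem.List.mem_sorted _ _ _ _).2 hc,
      by rwa [(PySem.List.sorted_perm id.toList (fun c => c) false).count_eq]⟩
  · rintro ⟨c, hc, hcount⟩
    exact ⟨c, (PySem.List.mem_sorted _ _ _ _).1 hc,
      by rwa [(PySem.List.sorted_perm id.toList (fun c => c) false).count_eq] at hcount⟩
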